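-- pv_equiv track=rewrite | github.com/cidit/crc2024 | prelims/prelim1/Prelim1/part_4/part_4.py | part_4
-- ===== SOURCE A (Python) =====
-- def part_4(text: str):
--     """
--     Print the 5 given words in a cascade.
--
--     Parameters:
--         text (str): The input string containing 5 words.
--
--     Returns:
--         list[str]: The cascade separated by level.
--     """
--
--     ### You code goes here ###
--     ### Votre code va ici ###
--
--     words = text.split()
--     # TODO: what if last character is not alpha? (ex: !, ?, .)
--     longest_length = max(map(lambda word: len(word), words))
--     words = map(lambda word: word.ljust(longest_length), words)
--     rows = [" " * row for row in range(longest_length)]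
--     for word in words:
--         for idx, char in enumerate(word):
--             rows[idx] += char + " "
--     cascade = map(lambda row: row[0:-1], rows)
--
--     return list(cascade)
-- ===== SOURCE B (Python) =====
-- def part_4(text: str):
--     words = text.split()
--     longest_length = max(len(w) for w in words)
--     padded = [w.ljust(longest_length) for w in words]
--     return [" " * i + " ".join(col) for i, col in enumerate(zip(*padded))]
-- ===== Notes on version B (the rewrite author's own statement) =====
-- stated objective: idiomatic
-- what changed: Replaces A's word-outer/index-inner scatter of characters into mutable row strings (rows[idx] += char + ' ' then trailing-space strip) by pad-then-transpose: ljust every word, zip(*padded) to get the columns, and build each row as ' '*i + ' '.join(column) in one comprehension.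
-- outside the precondition, e.g. on part_4(' '): A raises ValueError, B raises ValueError
import Mathlib
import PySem

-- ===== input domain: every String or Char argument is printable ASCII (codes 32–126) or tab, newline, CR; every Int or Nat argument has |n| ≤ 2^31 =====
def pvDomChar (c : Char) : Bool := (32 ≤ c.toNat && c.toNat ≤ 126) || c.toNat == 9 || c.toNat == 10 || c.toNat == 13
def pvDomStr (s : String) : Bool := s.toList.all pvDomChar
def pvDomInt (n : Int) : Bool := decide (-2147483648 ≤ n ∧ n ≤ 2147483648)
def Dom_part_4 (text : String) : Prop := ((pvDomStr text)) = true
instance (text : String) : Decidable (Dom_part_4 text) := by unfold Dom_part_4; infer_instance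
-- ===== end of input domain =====

-- B replaces A's word-outer/index-inner scattering of characters into mutable rows by
-- pad-then-transpose (zip of the padded words, one output row per column); idiomatic, same cost.

-- ===== PORT A =====
-- port of str.ljust(L): pad on the right with spaces up to width L (exact for 0 ≤ L)
def pvLjust (w : List Char) (L : Nat) : List Char := w ++ List.replicate (L - w.length) ' '

-- port of `rows[idx] += char + " "` (index read + index write; Python never hits the
-- out-of-range case here, the `none` branch is the would-be IndexError)
def pvUpd (rs : List (List Char)) (p : Int × Char) : List (List Char) :=
  match PySem.List.pyGet? rs p.1 with
  | some r => rs.set p.1.toNat (r ++ [p.2, ' '])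
  | none => rs

def part_4 (text : String) : List String :=
  let words := (PySem.Str.split₀ text).map String.toList
  match PySem.List.max? (words.map (fun w => (w.length : Int))) (fun x => x) with
  | none => []   -- Python raises ValueError (max of an empty sequence); excluded by Pre_part_4
  | some L =>
    let padded := words.map (fun w => pvLjust w L.toNat)
    let rows0 := (PySem.List.pyRange 0 L 1).map (fun i => PySem.List.pyRepeat [' '] i)
    let rows := padded.foldl (fun rs w => (PySem.List.enumerate w 0).foldl pvUpd rs) rows0
    rows.map (fun r => String.ofList (PySem.Chars.slice r none (some (-1))))

-- ===== PORT B =====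
-- port of zip(*padded): truncating column transpose, stops at the first exhausted list
def pvZipStar (ws : List (List Char)) : List (List Char) :=
  if h : ws.isEmpty || ws.any (·.isEmpty) then []
  else (ws.map (fun w => w.headD ' ')) :: pvZipStar (ws.map (·.tail))
termination_by (ws.headD []).length
decreasing_by
  cases ws with
  | nil => simp at h
  | cons w t =>
    simp only [List.isEmpty_cons, List.any_cons, Bool.or_eq_true, Bool.false_or] at h
    push Not at h
    cases w with
    | nil => simp at h
    | cons c cs => simp

def part_4_alt (text : String) : List String :=
  let words := (PySem.Str.split₀ text).map String.toList
  match PySem.List.max? (words.map (fun w => (w.length : Int))) (fun x => x) with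
  | none => []   -- max of an empty sequence raises in B too; excluded by Pre_part_4
  | some L =>
    let padded := words.map (fun w => pvLjust w L.toNat)
    (PySem.List.enumerate (pvZipStar padded) 0).map (fun p =>
      String.ofList (PySem.List.pyRepeat [' '] p.1 ++ PySem.Chars.join [' '] (p.2.map (fun c => [c]))))

-- ===== PRECONDITION & SPEC =====
-- Pre_ excludes exactly the whitespace-only inputs: text.split() is empty there and both
-- A and B raise ValueError on max() of an empty sequence.
def Pre_part_4 (text : String) : Prop := PySem.Str.split₀ text ≠ []
instance (text : String) : Decidable (Pre_part_4 text) := by unfold Pre_part_4; infer_instance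
def pvWitness_part_4 : String := "ab c!"

def Spec_part_4 (text : String) (out : List String) : Prop := out = part_4_alt text
instance (text : String) (out : List String) : Decidable (Spec_part_4 text out) := by unfold Spec_part_4; infer_instance

-- ===== CLAIM (what is proved, stated in full; the proofs are below) =====
def Claim_equal_part_4 : Prop := ∀ (text : String), Dom_part_4 text → Pre_part_4 text → Spec_part_4 text (part_4 text)

-- ===== LEMMAS AND PROOFS =====

theorem pvPyRange_eq (L : Nat) : PySem.List.pyRange 0 L 1 = (List.range L).map Int.ofNat := by
  induction L with
  | zero => simp [PySem.List.pyRange]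
  | succ n ih =>
    push_cast
    rw [PySem.List.pyRange_one_append (a := 0) (m := n) (b := n+1) (by omega) (by omega),
      PySem.List.pyRange_one_cons (by omega : (n:Int) < (n:Int)+1), List.range_succ]
    push_cast at ih
    rw [ih]
    simp [PySem.List.pyRange]

-- the inner loop of A updates each row once, in order: it is zipWith on the suffix
theorem pvInner (w : List Char) (n : Nat) (rs : List (List Char))
    (h : n + w.length ≤ rs.length) :
    (PySem.List.enumerate w n).foldl pvUpd rs
      = rs.take n ++ List.zipWith (fun r c => r ++ [c, ' ']) (rs.drop n) w
        ++ rs.drop (n + w.length) := by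
  induction w generalizing n rs with
  | nil =>
    simp [PySem.List.enumerate]
  | cons c w' ih =>
    rw [PySem.List.enumerate_cons, List.foldl_cons]
    have hn : n < rs.length := by simp at h; omega
    have hupd : pvUpd rs ((n : Int), c) = rs.take n ++ (rs[n] ++ [c, ' ']) :: rs.drop (n+1) := by
      simp only [pvUpd, PySem.List.pyGet?_natCast, List.getElem?_eq_getElem hn]
      rw [List.set_eq_take_append_cons_drop]
      simp [hn]
    have : ((n : Int) + 1) = ((n + 1 : Nat) : Int) := by push_cast; ring
    rw [hupd, this, ih (n+1) _ (by simp; simp at h; omega)]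
    rw [List.drop_eq_getElem_cons hn, List.zipWith_cons_cons]
    simp [List.take_append, List.drop_append, List.take_take, List.drop_take,
      Nat.min_def, show n ≤ rs.length from by omega, show n+1-n = 1 from by omega,
      show n+1+w'.length-n = w'.length+1 from by omega,
      show n - (n+1+w'.length) = 0 from by omega, List.drop_drop,
      show n + (w'.length+1) = w'.length + (n+1) from by omega]
    split_ifs <;> omega

-- the outer loop over equal-length words, pointwise
theorem pvOuter (ws : List (List Char)) (rs : List (List Char))
    (h : ∀ w ∈ ws, w.length = rs.length) :
    ws.foldl (fun rs w => (PySem.List.enumerate w 0).foldl pvUpd rs) rs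
      = List.zipWith (fun r i => r ++ ws.flatMap (fun w => [w.getD i ' ', ' '])) rs (List.range rs.length) := by
  induction ws generalizing rs with
  | nil =>
    apply List.ext_getElem <;> simp
  | cons w ws' ih =>
    rw [List.foldl_cons]
    have hw : w.length = rs.length := h w (by simp)
    have h0 : (PySem.List.enumerate w 0).foldl pvUpd rs
        = List.zipWith (fun r c => r ++ [c, ' ']) rs w := by
      have := pvInner w 0 rs (by omega)
      simpa [hw] using this
    rw [h0, ih _ (fun x hx => by rw [h x (by simp [hx]), List.length_zipWith]; omega)]
    apply List.ext_getElem
    · simp [hw]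
    · intro i h1 h2
      have hi : i < rs.length := by simpa using h2
      simp [List.getElem_zipWith, List.getElem_range,
        List.getElem?_eq_getElem (show i < w.length by omega)]

-- zip(*ws) on equal-length nonempty ws is the column map
theorem pvZipStar_eq (L : Nat) (ws : List (List Char)) (hne : ws ≠ [])
    (h : ∀ w ∈ ws, w.length = L) :
    pvZipStar ws = (List.range L).map (fun i => ws.map (fun w => w.getD i ' ')) := by
  induction L generalizing ws with
  | zero =>
    rw [pvZipStar, dif_pos]
    · simp
    · cases ws with
      | nil => simp at hne
      | cons w t =>
        have := h w (by simp)
        simp [List.eq_nil_of_length_eq_zero this]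
  | succ n ih =>
    have hcond : ¬(ws.isEmpty || ws.any (·.isEmpty)) = true := by
      simp only [Bool.or_eq_true, List.isEmpty_iff, List.any_eq_true]
      rintro (rfl | ⟨w, hw, hwE⟩)
      · exact hne rfl
      · have := h w hw
        have hwnil : w = [] := by
          revert hwE; cases w <;> simp
        simp [hwnil] at this
    rw [pvZipStar, dif_neg hcond, List.range_succ_eq_map, List.map_cons]
    congr 1
    · apply List.map_congr_left
      intro w hw
      have hl := h w hw
      cases w with
      | nil => simp at hl
      | cons c cs => rfl
    · rw [ih (ws.map (·.tail)) (by simpa using hne)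
        (by intro x hx; simp at hx; obtain ⟨w, hw, rfl⟩ := hx
            have := h w hw; cases w with
            | nil => simp at this
            | cons c cs => simpa using this)]
      rw [List.map_map]
      apply List.map_congr_left
      intro i _
      rw [List.map_map]
      apply List.map_congr_left
      intro w hw
      have := h w hw
      cases w with
      | nil => simp at this
      | cons c cs => rfl

-- dropping the trailing space of a scattered row equals joining the column with " "
theorem pvDropLast_join (ws : List (List Char)) (hne : ws ≠ []) (g : List Char → Char) :
    (ws.flatMap (fun w => [g w, ' '])).dropLast
      = PySem.Chars.join [' '] (ws.map (fun w => [g w])) := by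
  induction ws with
  | nil => simp at hne
  | cons w t ih =>
    cases t with
    | nil => simp [PySem.Chars.join_singleton]
    | cons u t' =>
      rw [List.map_cons, List.map_cons, PySem.Chars.join_cons_cons]
      simp only [List.flatMap_cons, List.cons_append, List.nil_append]
      rw [show (g w :: ' ' :: g u :: ' ' :: List.flatMap (fun w => [g w, ' ']) t')
            = [g w, ' '] ++ List.flatMap (fun w => [g w, ' ']) (u :: t') by simp]
      rw [List.dropLast_append_of_ne_nil (by simp), ih (by simp)]
      simp

theorem pvZipWithSame {α β : Type} (f : α → α → β) (l : List α) :
    List.zipWith f l l = l.map (fun x => f x x) := by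
  induction l with
  | nil => rfl
  | cons x t ih => simp only [List.zipWith_cons_cons, List.map_cons, ih]


-- mapping over an enumerated range-map, pointwise
theorem pvEnumMap {α β : Type} (f : Nat → α) (g : Int × α → β) (n : Nat) :
    (PySem.List.enumerate ((List.range n).map f) 0).map g
      = (List.range n).map (fun i => g (Int.ofNat i, f i)) := by
  apply List.ext_getElem
  · simp [PySem.List.length_enumerate]
  · intro k h1 h2
    have hk : k < n := by simpa [PySem.List.length_enumerate] using h1
    simp [PySem.List.getElem_enumerate, List.getElem_range, Int.ofNat_eq_natCast]

-- ===== VERDICT (by name: the statement is the Claim_ definition above) =====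
theorem part_4_spec : Claim_equal_part_4 := by
  intro text _ hpre
  unfold Spec_part_4 part_4 part_4_alt
  dsimp only
  set words := (PySem.Str.split₀ text).map String.toList with hwords
  have hwne : words ≠ [] := by
    intro hw
    have hlen := congrArg List.length hw
    rw [hwords, List.length_map, List.length_nil] at hlen
    exact hpre (List.eq_nil_of_length_eq_zero hlen)
  obtain ⟨L, hL⟩ : ∃ L, PySem.List.max? (words.map (fun w => (w.length : Int))) (fun x => x) = some L := by
    cases hmx : PySem.List.max? (words.map (fun w => (w.length : Int))) (fun x => x) with
    | none => exact absurd ((PySem.List.max?_eq_none_iff _ _).mp hmx) (by simp [hwne])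
    | some L => exact ⟨L, rfl⟩
  rw [hL]
  dsimp only
  have hLnn : 0 ≤ L := by
    have := PySem.List.max?_mem hL
    simp only [List.mem_map] at this
    obtain ⟨w, _, rfl⟩ := this
    positivity
  have hLmax : ∀ w ∈ words, w.length ≤ L.toNat := by
    intro w hw
    have := PySem.List.max?_isMax hL ((w.length : Int)) (by exact List.mem_map_of_mem hw)
    omega
  set padded := words.map (fun w => pvLjust w L.toNat) with hpadded
  have hplen : ∀ w ∈ padded, w.length = L.toNat := by
    intro w hw
    simp only [hpadded, List.mem_map] at hw
    obtain ⟨x, hx, rfl⟩ := hw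
    have := hLmax x hx
    simp [pvLjust]
    omega
  have hpne : padded ≠ [] := by
    simpa [hpadded] using hwne
  -- normalise A's rows0
  have hL' : L = ((L.toNat : Nat) : Int) := by omega
  have hrows0 : (PySem.List.pyRange 0 L 1).map (fun i => PySem.List.pyRepeat [' '] i)
      = (List.range L.toNat).map (fun i => List.replicate i ' ') := by
    rw [hL', pvPyRange_eq, List.map_map]
    apply List.map_congr_left
    intro i _
    simp [PySem.List.pyRepeat_singleton]
  rw [hrows0]
  -- A's fold = columnwise rows
  have hlen0 : ((List.range L.toNat).map (fun i => List.replicate i ' ')).length = L.toNat := by simp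
  rw [pvOuter padded _ (by intro w hw; rw [hplen w hw, hlen0])]
  rw [hlen0]
  -- B's transpose
  rw [pvZipStar_eq L.toNat padded hpne hplen, pvEnumMap]
  -- rows0 is a map over the same range: zip it away
  rw [show List.zipWith
        (fun r i => r ++ padded.flatMap (fun w => [w.getD i ' ', ' ']))
        ((List.range L.toNat).map (fun i => List.replicate i ' ')) (List.range L.toNat)
      = (List.range L.toNat).map
          (fun i => List.replicate i ' ' ++ padded.flatMap (fun w => [w.getD i ' ', ' '])) from by
    rw [List.zipWith_map_left]
    exact pvZipWithSame _ _]
  rw [List.map_map]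
  apply List.map_congr_left
  intro i _
  simp only [Function.comp]
  rw [PySem.Chars.slice_eq_listSlice, PySem.List.slice_to_neg_one]
  rw [List.dropLast_append_of_ne_nil (by
    obtain ⟨w, t, hwt⟩ := List.exists_cons_of_ne_nil hpne
    rw [hwt]
    simp)]
  rw [pvDropLast_join padded hpne (fun w => w.getD i ' ')]
  congr 1
  simp [PySem.List.pyRepeat_singleton, List.map_map]
  rfl
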